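-- pv_equiv track=rewrite | github.com/samarxie/Python-Machine-Learning-Homework | 20170911/kimmyzhang_20170911_03.py | solution
-- ===== SOURCE A (Python) =====
-- def get_max_index(nums):
--     len_nums = len(nums)
--     max_num = max(nums)
--     max_index = []
--     for i in range(len_nums):
--         if nums[i] == max_num:
--             max_index.append(i)
--     left_max_index = max_index[0]
--     right_max_index = max_index[-1]
--
--     return max_num, left_max_index, right_max_index
--
-- def solution(nums):
--
--     max_num, left_max_index, right_max_index = get_max_index(nums)
--     res_list = [0 for _ in range(left_max_index)]
--
--     # 考虑其他位置
--     i = 0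
--     while i <= left_max_index:
--         j = i + 1
--         while j <= left_max_index:
--             if nums[j] <= nums[i]:
--                 # 要对j进行加1操作
--                 j = j + 1
--                 continue
--             else:
--                 res_list[i: j] = [nums[i] for _ in range(j - i)]
--                 break
--         i = j
--
--     return res_list
-- ===== SOURCE B (Python) =====
-- def solution(nums):
--     m = max(nums)
--     res = []
--     cur = nums[0]
--     for x in nums:
--         if x == m:
--             return res
--         cur = max(cur, x)
--         res.append(cur)
--     return res
-- ===== Notes on version B (the rewrite author's own statement) =====
-- stated objective: simpler
-- what changed: Replaces the nested next-greater-element jump loops with slice assignment by a single prefix-maximum accumulator pass that stops at the first occurrence of the maximum.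
import Mathlib
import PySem

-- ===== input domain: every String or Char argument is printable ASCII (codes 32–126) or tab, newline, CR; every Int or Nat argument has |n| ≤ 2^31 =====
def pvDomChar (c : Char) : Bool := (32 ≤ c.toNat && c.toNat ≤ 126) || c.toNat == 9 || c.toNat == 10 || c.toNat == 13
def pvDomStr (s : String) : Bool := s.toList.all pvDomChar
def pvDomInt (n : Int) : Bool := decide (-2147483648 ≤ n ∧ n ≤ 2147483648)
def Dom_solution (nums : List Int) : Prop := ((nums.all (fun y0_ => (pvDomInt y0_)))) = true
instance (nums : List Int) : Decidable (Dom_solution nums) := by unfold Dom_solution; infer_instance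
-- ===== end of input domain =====

-- B replaces A's nested next-greater jumping with one prefix-maximum pass (simpler); both raise on [] (excluded by Pre_).

-- ===== PORT A =====
-- Python slice assignment res[i:j] = vals; exact here since A only uses it with 0 ≤ i ≤ j ≤ len(res) and len(vals) = j - i
def pySetSlice (res : List Int) (i j : Nat) (vals : List Int) : List Int :=
  res.take i ++ vals ++ res.drop j

-- get_max_index: max(nums) (none only on [], excluded by Pre_), the loop collecting indices of the max, first and last of them
def get_max_index (nums : List Int) : Int × Nat × Nat :=
  let m := (PySem.List.max? nums (fun y => y)).getD 0
  let idxs := (List.range nums.length).filter (fun i => nums.getD i 0 == m)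
  (m, idxs.headD 0, idxs.getLastD 0)

-- inner while loop: j walks right while nums[j] <= nums[i]; on the first greater element the slice res[i:j] is overwritten
-- (loop indices are in range whenever reached, so getD is exact)
def innerA (nums : List Int) (L i : Nat) (res : List Int) (j : Nat) : Nat × List Int :=
  if j ≤ L then
    if nums.getD j 0 ≤ nums.getD i 0 then innerA nums L i res (j+1)
    else (j, pySetSlice res i j (List.replicate (j - i) (nums.getD i 0)))
  else (j, res)
termination_by L + 1 - j

theorem innerA_le_fst (nums : List Int) (L i : Nat) (res : List Int) :
    ∀ j, j ≤ (innerA nums L i res j).1 := by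
  intro j
  fun_induction innerA <;> simp_all
  omega

-- outer while loop: i jumps to the j returned by the inner loop
def outerA (nums : List Int) (L : Nat) (i : Nat) (res : List Int) : List Int :=
  if i ≤ L then
    let p := innerA nums L i res (i+1)
    outerA nums L p.1 p.2
  else res
termination_by L + 1 - i
decreasing_by
  have := innerA_le_fst nums L i res (i+1); omega

def solution (nums : List Int) : List Int :=
  let t := get_max_index nums
  let left_max_index := t.2.1
  outerA nums left_max_index 0 (List.replicate left_max_index 0)

-- ===== PORT B =====
def altGo (m : Int) (cur : Int) (rest : List Int) (acc : List Int) : List Int :=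
  match rest with
  | [] => acc.reverse
  | x :: xs => if x = m then acc.reverse else altGo m (max cur x) xs (max cur x :: acc)

def solution_alt (nums : List Int) : List Int :=
  match nums with
  | [] => []   -- unreachable under Pre_ (Python B raises there, like A)
  | x :: _ => altGo ((PySem.List.max? nums (fun y => y)).getD 0) x nums []

-- ===== PRECONDITION & SPEC =====
-- Pre_ excludes only the empty list, on which Python A raises ValueError (max of empty sequence)
def Pre_solution (nums : List Int) : Prop := nums ≠ []
instance (nums : List Int) : Decidable (Pre_solution nums) := by unfold Pre_solution; infer_instance
def pvWitness_solution : List Int := [1, 3, 2]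

def Spec_solution (nums : List Int) (out : List Int) : Prop := out = solution_alt nums
instance (nums : List Int) (out : List Int) : Decidable (Spec_solution nums out) := by unfold Spec_solution; infer_instance

-- ===== CLAIM (what is proved, stated in full; the proofs are below) =====
def Claim_equal_solution : Prop := ∀ (nums : List Int), Dom_solution nums → Pre_solution nums → Spec_solution nums (solution nums)

-- ===== LEMMAS AND PROOFS =====

-- running prefix maximum of nums[0..k] (the common spec both ports are reduced to)
def pm (nums : List Int) : Nat → Int
  | 0 => nums.getD 0 0
  | k+1 => max (pm nums k) (nums.getD (k+1) 0)

theorem pm_step (nums : List Int) (i : Nat) :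
    max (pm nums (i - 1)) (nums.getD i 0) = pm nums i := by
  cases i with
  | zero => simp [pm]
  | succ k => simp [pm]

-- ---- B side: altGo produces the prefix maxima up to the first occurrence of m ----
theorem altGo_spec (nums : List Int) (m : Int) (L : Nat)
    (hLn : L < nums.length) (hLm : nums.getD L 0 = m)
    (hlt : ∀ k, k < L → nums.getD k 0 < m) :
    ∀ d i acc, i + d = L →
      acc.reverse = (List.range i).map (pm nums) →
      altGo m (pm nums (i - 1)) (nums.drop i) acc = (List.range L).map (pm nums) := by
  intro d
  induction d with
  | zero =>
    intro i acc hi hacc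
    have hiL : i = L := by omega
    subst hiL
    rw [List.drop_eq_getElem_cons hLn]
    have hx : nums[i] = m := by rw [← List.getD_eq_getElem nums 0 hLn]; exact hLm
    simp [altGo, hx, hacc]
  | succ d ih =>
    intro i acc hi hacc
    have hiL : i < L := by omega
    have hin : i < nums.length := by omega
    rw [List.drop_eq_getElem_cons hin]
    have hx : nums[i] = nums.getD i 0 := (List.getD_eq_getElem nums 0 hin).symm
    have hne : nums[i] ≠ m := by rw [hx]; exact ne_of_lt (hlt i hiL)
    have hcur : max (pm nums (i - 1)) nums[i] = pm nums i := by
      rw [hx]; exact pm_step nums i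
    rw [altGo, if_neg hne, hcur]
    have : pm nums ((i + 1) - 1) = pm nums i := by norm_num
    rw [← this]
    apply ih (i + 1) _ (by omega)
    simp [hacc, List.range_succ]

-- ---- A side: the inner loop finds the first strictly greater element and fills the slice ----
theorem inner_run (nums : List Int) (L i : Nat) (res : List Int) :
    ∀ fuel j, L + 1 - j ≤ fuel → i < j →
      (∃ k, j ≤ k ∧ k ≤ L ∧ nums.getD i 0 < nums.getD k 0) →
      ∃ jf, j ≤ jf ∧ jf ≤ L ∧ nums.getD i 0 < nums.getD jf 0 ∧
        (∀ k, j ≤ k → k < jf → nums.getD k 0 ≤ nums.getD i 0) ∧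
        innerA nums L i res j = (jf, pySetSlice res i jf (List.replicate (jf - i) (nums.getD i 0))) := by
  intro fuel
  induction fuel with
  | zero =>
    intro j hf _ hex
    obtain ⟨k, hk1, hk2, _⟩ := hex
    omega
  | succ fuel ih =>
    intro j hf hij hex
    obtain ⟨k, hk1, hk2, hk3⟩ := hex
    have hjL : j ≤ L := by omega
    rw [innerA, if_pos hjL]
    by_cases hle : nums.getD j 0 ≤ nums.getD i 0
    · rw [if_pos hle]
      have hkj : j + 1 ≤ k := by
        rcases Nat.lt_or_ge j k with h | h
        · omega
        · exfalso; have : k = j := by omega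
          subst this; omega
      obtain ⟨jf, h1, h2, h3, h4, h5⟩ :=
        ih (j + 1) (by omega) (by omega) ⟨k, hkj, hk2, hk3⟩
      refine ⟨jf, by omega, h2, h3, ?_, h5⟩
      intro k' hk'1 hk'2
      rcases Nat.lt_or_ge j k' with h | h
      · exact h4 k' (by omega) hk'2
      · have : k' = j := by omega
        subst this; exact hle
    · rw [if_neg hle]
      exact ⟨j, le_refl j, hjL, by omega, by omega, rfl⟩

theorem pySetSlice_length (res : List Int) (i j : Nat) (v : Int)
    (hij : i ≤ j) (hj : j ≤ res.length) :
    (pySetSlice res i j (List.replicate (j - i) v)).length = res.length := by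
  simp [pySetSlice]; omega

theorem pySetSlice_getD_lt (res : List Int) (i j : Nat) (v : Int) (k : Nat)
    (hk : k < i) (hi : i ≤ res.length) :
    (pySetSlice res i j (List.replicate (j - i) v)).getD k 0 = res.getD k 0 := by
  simp [pySetSlice, List.getD_eq_getElem?_getD, List.getElem?_append,
    List.length_take, hk, Nat.lt_of_lt_of_le hk hi]

theorem pySetSlice_getD_mid (res : List Int) (i j : Nat) (v : Int) (k : Nat)
    (hik : i ≤ k) (hkj : k < j) (hj : j ≤ res.length) :
    (pySetSlice res i j (List.replicate (j - i) v)).getD k 0 = v := by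
  have hi : i ≤ res.length := le_trans (le_of_lt (Nat.lt_of_le_of_lt hik hkj)) hj
  have h1 : (res.take i).length = i := by simp; omega
  have h2 : (List.replicate (j - i) v).length = j - i := by simp
  simp only [pySetSlice, List.getD_eq_getElem?_getD]
  rw [List.getElem?_append_left (by rw [List.length_append, h1, h2]; omega)]
  rw [List.getElem?_append_right (by rw [h1]; omega)]
  rw [h1, List.getElem?_replicate]
  simp [Nat.sub_lt_sub_right hik hkj]

-- res with all entries < L equal to pm equals the mapped range
theorem res_eq_map (nums : List Int) (L : Nat) (res : List Int)
    (hlen : res.length = L)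
    (hval : ∀ k, k < L → res.getD k 0 = pm nums k) :
    res = (List.range L).map (pm nums) := by
  apply List.ext_getElem (by simp [hlen])
  intro k h1 h2
  have hkL : k < L := by omega
  have := hval k hkL
  rw [List.getD_eq_getElem res 0 h1] at this
  simp [this]

-- ---- A side: the outer loop maintains "res is the prefix maxima below i" ----
theorem outer_correct (nums : List Int) (m : Int) (L : Nat)
    (hLm : nums.getD L 0 = m)
    (hlt : ∀ k, k < L → nums.getD k 0 < m) :
    ∀ fuel i res, L + 1 - i ≤ fuel →
      res.length = L →
      (∀ k, k < i → k < L → res.getD k 0 = pm nums k) →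
      (i ≤ L → nums.getD i 0 = pm nums i) →
      outerA nums L i res = (List.range L).map (pm nums) := by
  intro fuel
  induction fuel with
  | zero =>
    intro i res hf hlen hval _
    rw [outerA, if_neg (by omega)]
    exact res_eq_map nums L res hlen (fun k hk => hval k (by omega) hk)
  | succ fuel ih =>
    intro i res hf hlen hval hpmi
    by_cases hi : i ≤ L
    · rw [outerA, if_pos hi]
      by_cases hiL : i < L
      · -- the inner loop must find a strictly greater element at or before L
        have hex : ∃ k, i + 1 ≤ k ∧ k ≤ L ∧ nums.getD i 0 < nums.getD k 0 :=
          ⟨L, by omega, le_refl L, by rw [hLm]; exact hlt i hiL⟩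
        obtain ⟨jf, h1, h2, h3, h4, h5⟩ :=
          inner_run nums L i res (L + 1) (i + 1) (by omega) (by omega) hex
        rw [h5]
        have hjfres : jf ≤ res.length := by omega
        have hijf : i ≤ jf := by omega
        -- the slice carries pm: all filled positions have prefix max nums[i]
        have hconst : ∀ k, i ≤ k → k < jf → pm nums k = nums.getD i 0 := by
          intro k
          induction k with
          | zero =>
            intro hik _
            have : i = 0 := by omega
            subst this
            exact (hpmi hi).symm
          | succ k ihk =>
            intro hik hkjf
            rcases Nat.lt_or_ge k i with h | h
            · have : i = k + 1 := by omega
              subst this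
              exact (hpmi hi).symm
            · have hpk : pm nums k = nums.getD i 0 := ihk h (by omega)
              have hle : nums.getD (k + 1) 0 ≤ nums.getD i 0 := h4 (k + 1) (by omega) hkjf
              show max (pm nums k) (nums.getD (k + 1) 0) = nums.getD i 0
              rw [hpk]; exact max_eq_left hle
        apply ih jf _ (by omega)
        · rw [pySetSlice_length res i jf _ hijf hjfres]; exact hlen
        · intro k hk1 hk2
          rcases Nat.lt_or_ge k i with h | h
          · rw [pySetSlice_getD_lt res i jf _ k h (by omega)]
            exact hval k h hk2
          · rw [pySetSlice_getD_mid res i jf _ k h hk1 hjfres]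
            exact (hconst k h hk1).symm
        · intro hjfL
          have hjf1 : 1 ≤ jf := by omega
          have := pm_step nums jf
          have hpmm : pm nums (jf - 1) = nums.getD i 0 := hconst (jf - 1) (by omega) (by omega)
          rw [hpmm] at this
          rw [← this]
          exact (max_eq_right (le_of_lt h3)).symm
      · -- i = L: the inner loop does nothing and the outer loop exits next
        have hiL' : i = L := by omega
        have hinner : innerA nums L i res (i + 1) = (i + 1, res) := by
          rw [innerA, if_neg (by omega)]
        rw [hinner]
        apply ih (i + 1) res (by omega) hlen
        · intro k hk1 hk2; exact hval k (by omega) hk2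
        · intro h; omega
    · rw [outerA, if_neg hi]
      exact res_eq_map nums L res hlen (fun k hk => hval k (by omega) hk)

-- ---- setting up m and L from the ports' definitions ----
theorem main_equiv (a : Int) (t : List Int) :
    solution (a :: t) = solution_alt (a :: t) := by
  obtain ⟨nums, hnums⟩ : ∃ l, l = a :: t := ⟨a :: t, rfl⟩
  rw [← hnums]
  have hmax? : PySem.List.max? nums (fun y => y) = some (t.foldl max a) := by
    rw [hnums]; exact PySem.List.max?_id_cons a t
  obtain ⟨m, hmax?⟩ : ∃ m, PySem.List.max? nums (fun y => y) = some m := ⟨_, hmax?⟩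
  have hm' : (PySem.List.max? nums (fun y => y)).getD 0 = m := by rw [hmax?]; rfl
  have hmem : m ∈ nums := PySem.List.max?_mem hmax?
  have hmaxall : ∀ y ∈ nums, y ≤ m := PySem.List.max?_isMax hmax?
  obtain ⟨idx, hidxlt, hidxv⟩ := List.getElem_of_mem hmem
  have hidxmem : idx ∈ (List.range nums.length).filter (fun i => nums.getD i 0 == m) := by
    rw [List.mem_filter]
    refine ⟨List.mem_range.mpr hidxlt, ?_⟩
    simp only [beq_iff_eq]
    rw [List.getD_eq_getElem nums 0 hidxlt]; exact hidxv
  have hpw : ((List.range nums.length).filter (fun i => nums.getD i 0 == m)).Pairwise (· < ·) :=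
    (List.pairwise_lt_range).filter _
  rcases hcons : (List.range nums.length).filter (fun i => nums.getD i 0 == m) with _ | ⟨L, tl⟩
  · rw [hcons] at hidxmem; simp at hidxmem
  rw [hcons] at hidxmem hpw
  have hLmem : L ∈ (List.range nums.length).filter (fun i => nums.getD i 0 == m) := by
    rw [hcons]; exact List.mem_cons_self
  rw [List.mem_filter] at hLmem
  have hLn : L < nums.length := List.mem_range.mp hLmem.1
  have hLm : nums.getD L 0 = m := by have := hLmem.2; simpa using this
  have hlt : ∀ k, k < L → nums.getD k 0 < m := by
    intro k hkL
    have hkn : k < nums.length := by omega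
    have hle : nums.getD k 0 ≤ m := by
      rw [List.getD_eq_getElem nums 0 hkn]
      exact hmaxall _ (List.getElem_mem hkn)
    rcases lt_or_eq_of_le hle with h | h
    · exact h
    · exfalso
      have hkmem : k ∈ L :: tl := by
        rw [← hcons, List.mem_filter]
        refine ⟨List.mem_range.mpr hkn, ?_⟩
        simp only [beq_iff_eq]; exact h
      rcases List.mem_cons.mp hkmem with h' | h'
      · omega
      · have := (List.pairwise_cons.mp hpw).1 k h'; omega
  -- A's port reduces to the outer loop at the first max index L
  have hL : (get_max_index nums).2.1 = L := by
    simp only [get_max_index]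
    rw [hm', hcons]
    rfl
  have hA : solution nums = outerA nums L 0 (List.replicate L 0) := by
    simp only [solution]
    rw [hL]
  have hA2 : outerA nums L 0 (List.replicate L 0) = (List.range L).map (pm nums) := by
    apply outer_correct nums m L hLm hlt (L + 1) 0 _ (by omega) (by simp)
    · intro k hk _; omega
    · intro _; rfl
  -- B's port
  have hB : solution_alt nums = altGo m a nums [] := by
    rw [hnums]
    show altGo ((PySem.List.max? (a :: t) (fun y => y)).getD 0) a (a :: t) [] = _
    rw [← hnums, hm', hnums]
  have hpm0 : pm nums (0 - 1) = a := by
    show nums.getD 0 0 = a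
    rw [hnums]; rfl
  have hB2 : altGo m a nums [] = (List.range L).map (pm nums) := by
    rw [← hpm0]
    have hdrop : nums.drop 0 = nums := rfl
    conv_lhs => rw [← hdrop]
    exact altGo_spec nums m L hLn hLm hlt L 0 [] (by omega) (by simp)
  rw [hA, hA2, hB, hB2]

-- ===== VERDICT (by name: the statement is the Claim_ definition above) =====
theorem solution_spec : Claim_equal_solution := by
  intro nums _ hpre
  unfold Spec_solution
  match nums with
  | [] => exact absurd rfl hpre
  | a :: t => exact main_equiv a t
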